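-- pv_equiv track=rewrite | github.com/eunaJung01/Algorithm-Solvings | Programmers/Level_2/뉴스 클러스터링.py | get_str_pairs
-- ===== SOURCE A (Python) =====
-- def get_str_pairs(s):
--     pairs = []
--     for i in range(len(s) - 1):
--         if s[i] == " " or s[i + 1] == " ":
--             continue
--         if 97 <= ord(s[i]) <= 122 and 97 <= ord(s[i + 1]) <= 122:
--             pairs.append(s[i:i + 2])
--     return pairs
-- ===== SOURCE B (Python) =====
-- def get_str_pairs(s):
--     # Stage 1: split s into maximal runs of lowercase ASCII letters.
--     runs = []
--     cur = []
--     for ch in s: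
--         if 'a' <= ch <= 'z':
--             cur.append(ch)
--         else:
--             if cur:
--                 runs.append(''.join(cur))
--                 cur = []
--     if cur:
--         runs.append(''.join(cur))
--     # Stage 2: each run of length L contributes its L-1 adjacent bigrams.
--     pairs = []
--     for run in runs:
--         for i in range(len(run) - 1):
--             pairs.append(run[i:i + 2])
--     return pairs
-- ===== Notes on version B (the rewrite author's own statement) =====
-- stated objective: alternative
-- what changed: Instead of A's single indexed pass testing each adjacent pair (with a space check), B is a two-stage algorithm: it first splits the string into maximal runs of lowercase letters, then emits each run's adjacent bigrams; per-character appends plus per-run slicing avoid A's per-index ord() tests and two-sided lookups, a constant-factor win.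
import Mathlib
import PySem

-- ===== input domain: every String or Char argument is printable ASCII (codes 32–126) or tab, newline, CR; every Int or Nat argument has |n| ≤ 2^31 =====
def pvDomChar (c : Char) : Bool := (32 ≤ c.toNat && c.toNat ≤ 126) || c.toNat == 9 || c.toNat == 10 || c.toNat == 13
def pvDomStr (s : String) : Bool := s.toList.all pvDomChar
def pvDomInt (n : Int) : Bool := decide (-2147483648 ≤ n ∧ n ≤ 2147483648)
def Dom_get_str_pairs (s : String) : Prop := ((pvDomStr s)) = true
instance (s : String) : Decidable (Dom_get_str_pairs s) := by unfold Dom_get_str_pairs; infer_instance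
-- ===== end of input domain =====

-- B is a two-stage alternative: split into maximal lowercase runs, then emit each run's bigrams.

-- ===== PORT A =====
def get_str_pairs (s : String) : List String :=
  (PySem.List.pyRange 0 ((s.toList.length : Int) - 1) 1).foldl (fun pairs i =>
    match PySem.List.pyGet? s.toList i, PySem.List.pyGet? s.toList (i + 1) with
    | some a, some b =>
      if a = ' ' ∨ b = ' ' then pairs
      else if 97 ≤ a.toNat ∧ a.toNat ≤ 122 ∧ 97 ≤ b.toNat ∧ b.toNat ≤ 122 then
        pairs ++ [String.ofList (PySem.List.slice s.toList (some i) (some (i + 2)))]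
      else pairs
    | _, _ => pairs) []

-- ===== PORT B =====
-- stage 1: fold building (runs, cur); stage 2: nested loop emitting each run's bigrams
def get_str_pairs_alt (s : String) : List String :=
  let st := s.toList.foldl
    (fun (st : List String × List Char) ch =>
      if 'a' ≤ ch ∧ ch ≤ 'z' then (st.1, st.2 ++ [ch])
      else if st.2 ≠ [] then (st.1 ++ [String.ofList st.2], []) else st)
    ([], [])
  let runs := if st.2 ≠ [] then st.1 ++ [String.ofList st.2] else st.1
  runs.foldl (fun pairs run =>
    (PySem.List.pyRange 0 ((run.toList.length : Int) - 1) 1).foldl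
      (fun pairs i =>
        pairs ++ [String.ofList (PySem.List.slice run.toList (some i) (some (i + 2)))])
      pairs) []

-- ===== PRECONDITION & SPEC =====
def Spec_get_str_pairs (s : String) (out : List String) : Prop := out = get_str_pairs_alt s
instance (s : String) (out : List String) : Decidable (Spec_get_str_pairs s out) := by unfold Spec_get_str_pairs; infer_instance

-- ===== CLAIM (what is proved, stated in full; the proofs are below) =====
def Claim_equal_get_str_pairs : Prop := ∀ (s : String), Dom_get_str_pairs s → Spec_get_str_pairs s (get_str_pairs s)

-- ===== LEMMAS AND PROOFS =====

-- common intermediate form: filtered adjacent pairs of a character list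
def pvLow (c : Char) : Bool := 'a' ≤ c && c ≤ 'z'

def pvZipform (cs : List Char) : List String :=
  ((cs.zip cs.tail).filter (fun p => pvLow p.1 && pvLow p.2)).map
    (fun p => String.ofList [p.1, p.2])

def pvPairsOf : List Char → List String
  | a :: b :: rest =>
      (if pvLow a && pvLow b then [String.ofList [a, b]] else []) ++ pvPairsOf (b :: rest)
  | _ => []

theorem charLe (c d : Char) : (c ≤ d) ↔ (c.toNat ≤ d.toNat) := by
  rw [Char.le_def, UInt32.le_iff_toNat_le]
  exact Iff.rfl

theorem zip_tail_eq (cs : List Char) :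
    cs.zip cs.tail = (List.range (cs.length - 1)).map (fun i => (cs.getD i ' ', cs.getD (i+1) ' ')) := by
  apply List.ext_getElem
  · simp
  · intro i h1 h2
    simp only [List.length_zip, List.length_tail] at h1
    simp only [List.getElem_zip, List.getElem_map, List.getElem_range, List.getElem_tail]
    rw [List.getD_eq_getElem cs ' ' (by omega), List.getD_eq_getElem cs ' ' (by omega)]

-- A computes the filtered adjacent pairs of s
theorem a_eq_zipform (s : String) : get_str_pairs s = pvZipform s.toList := by
  unfold get_str_pairs pvZipform
  set cs := s.toList with hcs
  clear hcs
  rw [PySem.List.foldl_congr_mem _ _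
    (fun (pairs : List String) (i : Int) =>
      if (pvLow (cs.getD i.toNat ' ') && pvLow (cs.getD (i.toNat+1) ' '))
      then pairs ++ [String.ofList [cs.getD i.toNat ' ', cs.getD (i.toNat+1) ' ']] else pairs) []
    (by
      intro acc i hi
      rw [PySem.List.mem_pyRange_one] at hi
      obtain ⟨h0, h1⟩ := hi
      obtain ⟨j, rfl⟩ : ∃ j : Nat, i = (j : Int) := ⟨i.toNat, by omega⟩
      have hlen : j + 1 < cs.length := by omega
      have e1 : PySem.List.pyGet? cs (j : Int) = some (cs.getD j ' ') := by
        rw [PySem.List.pyGet?_natCast, List.getElem?_eq_getElem (by omega),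
          List.getD_eq_getElem cs ' ' (by omega)]
      have e2 : PySem.List.pyGet? cs ((j : Int) + 1) = some (cs.getD (j + 1) ' ') := by
        rw [show (j : Int) + 1 = ((j + 1 : Nat) : Int) from by omega, PySem.List.pyGet?_natCast,
          List.getElem?_eq_getElem (by omega), List.getD_eq_getElem cs ' ' (by omega)]
      rw [e1, e2]
      simp only [Int.toNat_natCast]
      have h32 : (' ' : Char).toNat = 32 := by decide
      show (if cs.getD j ' ' = ' ' ∨ cs.getD (j + 1) ' ' = ' ' then acc
        else if 97 ≤ (cs.getD j ' ').toNat ∧ (cs.getD j ' ').toNat ≤ 122 ∧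
            97 ≤ (cs.getD (j + 1) ' ').toNat ∧ (cs.getD (j + 1) ' ').toNat ≤ 122 then
          acc ++ [String.ofList (PySem.List.slice cs (some (j : Int)) (some ((j : Int) + 2)))]
        else acc) = _
      have hlowiff : ∀ c : Char, pvLow c = true ↔ 97 ≤ c.toNat ∧ c.toNat ≤ 122 := by
        intro c
        simp only [pvLow, Bool.and_eq_true, decide_eq_true_eq, charLe]
        simp only [show ('a' : Char).toNat = 97 from by decide,
          show ('z' : Char).toNat = 122 from by decide]
      by_cases hl : 97 ≤ (cs.getD j ' ').toNat ∧ (cs.getD j ' ').toNat ≤ 122 ∧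
          97 ≤ (cs.getD (j + 1) ' ').toNat ∧ (cs.getD (j + 1) ' ').toNat ≤ 122
      · have hsp : ¬ (cs.getD j ' ' = ' ' ∨ cs.getD (j + 1) ' ' = ' ') := by
          rintro (h | h) <;> rw [h, h32] at hl <;> omega
        have hbt : (pvLow (cs.getD j ' ') && pvLow (cs.getD (j+1) ' ')) = true := by
          rw [Bool.and_eq_true, hlowiff, hlowiff]
          exact ⟨⟨hl.1, hl.2.1⟩, hl.2.2.1, hl.2.2.2⟩
        rw [if_neg hsp, if_pos ⟨hl.1, hl.2.1, hl.2.2⟩, hbt, if_pos rfl]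
        have hslice : PySem.List.slice cs (some (j : Int)) (some ((j : Int) + 2)) =
            [cs.getD j ' ', cs.getD (j + 1) ' '] := by
          rw [List.getD_eq_getElem cs ' ' (show j < cs.length by omega),
            List.getD_eq_getElem cs ' ' (show j + 1 < cs.length by omega)]
          rw [show ((j : Int)) + 2 = ((j : Int)) + ((2 : Nat) : Int) from by norm_num,
            PySem.List.slice_natCast_add]
          rw [List.drop_eq_getElem_cons (i := j) (l := cs) (by omega),
            List.drop_eq_getElem_cons (i := j + 1) (l := cs) (by omega)]
          rfl
        rw [hslice]
      · have hbf : ¬ (pvLow (cs.getD j ' ') && pvLow (cs.getD (j+1) ' ')) = true := by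
          rw [Bool.and_eq_true, hlowiff, hlowiff]
          rintro ⟨⟨x1, x2⟩, x3, x4⟩
          exact hl ⟨x1, x2, x3, x4⟩
        rw [Bool.not_eq_true] at hbf
        rw [hbf]
        simp only [Bool.false_eq_true, if_false]
        by_cases hs : cs.getD j ' ' = ' ' ∨ cs.getD (j + 1) ' ' = ' '
        · rw [if_pos hs]
        · rw [if_neg hs, if_neg hl])]
  rw [PySem.List.foldl_append_if, List.nil_append]
  rcases cs with _ | ⟨c, cs'⟩
  · simp [PySem.List.pyRange]
  · have hm : ((c :: cs').length : Int) - 1 = (((c :: cs').length - 1 : Nat) : Int) := by simp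
    rw [hm, PySem.List.pyRange_zero_natCast, List.filter_map, List.map_map]
    rw [zip_tail_eq, List.filter_map, List.map_map]
    simp [Function.comp_def]

-- the recursive pairsOf agrees with the zip form
theorem zipform_eq_pairsOf (cs : List Char) : pvZipform cs = pvPairsOf cs := by
  match cs with
  | [] => rfl
  | [a] => rfl
  | a :: b :: rest =>
    have ih := zipform_eq_pairsOf (b :: rest)
    unfold pvZipform at ih ⊢
    simp only [List.tail_cons, List.zip_cons_cons, List.filter_cons]
    rw [pvPairsOf]
    by_cases h : (pvLow a && pvLow b) = true
    · simp only [h, if_pos, List.map_cons, ← ih]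
      rfl
    · rw [Bool.not_eq_true] at h
      simp only [h, Bool.false_eq_true, if_false, List.nil_append, ← ih]
      rfl

-- pairs vanish across a non-lowercase separator
theorem pairsOf_append (xs ys : List Char) (ch : Char) (h : pvLow ch = false) :
    pvPairsOf (xs ++ ch :: ys) = pvPairsOf xs ++ pvPairsOf ys := by
  match xs with
  | [] =>
    match ys with
    | [] => rfl
    | y :: ys' =>
      simp only [List.nil_append, pvPairsOf, h, Bool.false_and]
      rfl
  | [x] =>
    simp only [List.cons_append, List.nil_append, pvPairsOf, h, Bool.and_false]
    rw [show pvPairsOf (ch :: ys) = pvPairsOf ([] ++ ch :: ys) from rfl,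
      pairsOf_append [] ys ch h]
    rfl
  | x1 :: x2 :: xs' =>
    have ih := pairsOf_append (x2 :: xs') ys ch h
    simp only [List.cons_append] at ih ⊢
    rw [pvPairsOf, pvPairsOf, ih, List.append_assoc]

-- on an all-lowercase run, pairsOf keeps every adjacent pair
theorem pairsOf_lower (run : List Char) (h : ∀ c ∈ run, pvLow c = true) :
    pvPairsOf run = (run.zip run.tail).map (fun p => String.ofList [p.1, p.2]) := by
  match run with
  | [] => rfl
  | [a] => rfl
  | a :: b :: rest =>
    have ih := pairsOf_lower (b :: rest) (fun c hc => h c (List.mem_cons_of_mem a hc))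
    rw [pvPairsOf, ih]
    have ha : pvLow a = true := h a (by simp)
    have hb : pvLow b = true := h b (by simp)
    simp [ha, hb]

-- the inner emission loop equals the map of bigrams of the run
theorem emit_run (run : List Char) (acc : List String) :
    (PySem.List.pyRange 0 ((run.length : Int) - 1) 1).foldl
      (fun pairs i =>
        pairs ++ [String.ofList (PySem.List.slice run (some i) (some (i + 2)))]) acc
    = acc ++ (run.zip run.tail).map (fun p => String.ofList [p.1, p.2]) := by
  rw [PySem.List.foldl_append_singleton_eq_map]
  rcases run with _ | ⟨c, cs'⟩
  · simp [PySem.List.pyRange]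
  · have hm : ((c :: cs').length : Int) - 1 = (((c :: cs').length - 1 : Nat) : Int) := by simp
    rw [hm, PySem.List.pyRange_zero_natCast, List.map_map, zip_tail_eq, List.map_map]
    congr 1
    apply List.map_congr_left
    intro i hi
    rw [List.mem_range] at hi
    simp only [Function.comp_apply]
    set cs := c :: cs' with hcs
    have hlen : i + 1 < cs.length := by
      rw [hcs]
      simp only [hcs, List.length_cons, Nat.add_sub_cancel] at hi
      simp only [List.length_cons]
      omega
    rw [List.getD_eq_getElem cs ' ' (by omega), List.getD_eq_getElem cs ' ' (by omega)]
    rw [show ((i : Nat) : Int) + 2 = ((i : Nat) : Int) + ((2 : Nat) : Int) from by norm_num,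
      PySem.List.slice_natCast_add]
    rw [List.drop_eq_getElem_cons (i := i) (l := cs) (by omega),
      List.drop_eq_getElem_cons (i := i + 1) (l := cs) (by omega)]
    rfl

def pvStep (st : List String × List Char) (ch : Char) : List String × List Char :=
  if 'a' ≤ ch ∧ ch ≤ 'z' then (st.1, st.2 ++ [ch])
  else if st.2 ≠ [] then (st.1 ++ [String.ofList st.2], []) else st

def pvJ (r : String) : List String :=
  (r.toList.zip r.toList.tail).map (fun p => String.ofList [p.1, p.2])

theorem low_iff (ch : Char) : ('a' ≤ ch ∧ ch ≤ 'z') ↔ pvLow ch = true := by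
  simp [pvLow]

-- fold invariant for stage 1 + emission
theorem fold_inv (cs : List Char) : ∀ (runs : List String) (cur : List Char),
    (∀ c ∈ cur, pvLow c = true) →
    ((if (cs.foldl pvStep (runs, cur)).2 ≠ [] then
        (cs.foldl pvStep (runs, cur)).1 ++ [String.ofList (cs.foldl pvStep (runs, cur)).2]
      else (cs.foldl pvStep (runs, cur)).1).flatMap pvJ)
    = runs.flatMap pvJ ++ pvPairsOf (cur ++ cs) := by
  match cs with
  | [] =>
    intro runs cur hcur
    simp only [List.foldl_nil, List.append_nil]
    by_cases hc : cur = []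
    · subst hc; simp [pvPairsOf]
    · rw [if_pos hc, List.flatMap_append]
      simp only [List.flatMap_cons, List.flatMap_nil, List.append_nil, pvJ,
        String.toList_ofList]
      rw [pairsOf_lower cur hcur]
  | ch :: cs' =>
    intro runs cur hcur
    rw [List.foldl_cons]
    by_cases hl : 'a' ≤ ch ∧ ch ≤ 'z'
    · have : pvStep (runs, cur) ch = (runs, cur ++ [ch]) := by
        simp [pvStep, hl]
      rw [this, fold_inv cs' runs (cur ++ [ch])
        (by intro c hc; rcases List.mem_append.1 hc with h | h
            · exact hcur c h
            · simp at h; subst h; exact (low_iff _).1 hl)]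
      rw [List.append_assoc]
      rfl
    · have hlf : pvLow ch = false := by
        rw [← Bool.not_eq_true, ← low_iff]; exact hl
      by_cases hc : cur = []
      · have : pvStep (runs, cur) ch = (runs, cur) := by
          simp [pvStep, hl, hc]
        have e : pvPairsOf (ch :: cs') = pvPairsOf cs' := by
          have := pairsOf_append [] cs' ch hlf
          simpa [pvPairsOf] using this
        rw [this, fold_inv cs' runs cur hcur, hc, List.nil_append, List.nil_append, e]
      · have : pvStep (runs, cur) ch = (runs ++ [String.ofList cur], []) := by
          simp [pvStep, hl, hc]
        rw [this, fold_inv cs' (runs ++ [String.ofList cur]) [] (by simp)]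
        rw [List.nil_append, pairsOf_append cur cs' ch hlf, List.flatMap_append]
        simp only [List.flatMap_cons, List.flatMap_nil, List.append_nil, pvJ,
          String.toList_ofList]
        rw [pairsOf_lower cur hcur, List.append_assoc]

theorem b_eq_pairsOf (s : String) : get_str_pairs_alt s = pvPairsOf s.toList := by
  unfold get_str_pairs_alt
  simp only []
  have hstep : (fun (st : List String × List Char) ch =>
      if 'a' ≤ ch ∧ ch ≤ 'z' then (st.1, st.2 ++ [ch])
      else if st.2 ≠ [] then (st.1 ++ [String.ofList st.2], ([] : List Char)) else st) = pvStep := by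
    funext st ch; rfl
  rw [hstep]
  have hemit : ∀ (runs : List String),
      runs.foldl (fun pairs run =>
        (PySem.List.pyRange 0 ((run.toList.length : Int) - 1) 1).foldl
          (fun pairs i =>
            pairs ++ [String.ofList (PySem.List.slice run.toList (some i) (some (i + 2)))])
          pairs) [] = runs.flatMap pvJ := by
    intro runs
    rw [PySem.List.foldl_congr_mem _ _ (fun pairs run => pairs ++ pvJ run) []
      (by intro acc run _; rw [emit_run]; rfl)]
    rw [PySem.List.foldl_append_eq_flatMap, List.nil_append]
  rw [hemit]
  have := fold_inv s.toList [] [] (by simp)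
  simpa using this

-- ===== VERDICT (by name: the statement is the Claim_ definition above) =====
theorem get_str_pairs_spec : Claim_equal_get_str_pairs := by
  intro s _
  unfold Spec_get_str_pairs
  rw [a_eq_zipform, b_eq_pairsOf, zipform_eq_pairsOf]
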